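-- pv_equiv track=rewrite | github.com/amykimecon/6009 | lab8B/lab.py | subtokenize
-- ===== SOURCE A (Python) =====
-- def subtokenize(str):
--     """
--     Splits a string with no spaces into tokens. Helper function for tokenize.
--     """
--     result = []
--     substr = ""
--     for letter in str:
--         if letter == "(" or letter == ")":
--             #Separate by parentheses
--             if len(substr) > 0:
--                 result.append(substr)
--                 substr = ""
--             result.append(letter)
--         else:
--             substr = substr + letter
--     if len(substr) > 0:
--         result.append(substr)
--
--     return result
-- ===== SOURCE B (Python) =====
-- def subtokenize(str):
--     """
--     Splits a string with no spaces into tokens. Helper function for tokenize.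
--     """
--     tokens = []
--     i = 0
--     n = len(str)
--     while i < n:
--         if str[i] in '()':
--             tokens.append(str[i])
--             i += 1
--         else:
--             j = i + 1
--             while j < n and str[j] not in '()':
--                 j += 1
--             tokens.append(str[i:j])
--             i = j
--     return tokens
-- ===== Notes on version B (the rewrite author's own statement) =====
-- stated objective: alternative
-- what changed: Replaces the accumulate-and-flush character loop (pending substring buffer flushed at parentheses and at the end) with an index-based run scanner that, at each position, either emits one parenthesis or finds the end of the maximal non-parenthesis run and emits that slice directly.
import Mathlib
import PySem

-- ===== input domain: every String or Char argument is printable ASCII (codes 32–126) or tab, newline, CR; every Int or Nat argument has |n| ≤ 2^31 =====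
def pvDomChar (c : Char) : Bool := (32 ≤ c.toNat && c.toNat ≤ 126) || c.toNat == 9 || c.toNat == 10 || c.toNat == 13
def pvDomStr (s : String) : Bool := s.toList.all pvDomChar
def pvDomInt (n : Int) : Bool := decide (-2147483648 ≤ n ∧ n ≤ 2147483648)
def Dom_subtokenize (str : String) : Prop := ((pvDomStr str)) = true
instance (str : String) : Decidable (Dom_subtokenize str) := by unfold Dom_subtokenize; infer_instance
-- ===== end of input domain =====

-- B replaces A's accumulate-and-flush loop with an index-based maximal-run scanner; alternative decomposition, same O(n) cost.


-- ===== PORT A =====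
-- A's loop state: (result, substr); substr kept as List Char (Python string concat = append).
def subtokStepA (st : List String × List Char) (letter : Char) : List String × List Char :=
  if letter = '(' ∨ letter = ')' then
    (st.1 ++ (if st.2.length > 0 then [String.mk st.2] else []) ++ [String.mk [letter]], [])
  else
    (st.1, st.2 ++ [letter])

def subtokenize (str : String) : List String :=
  let st := str.toList.foldl subtokStepA ([], [])
  st.1 ++ (if st.2.length > 0 then [String.mk st.2] else [])

-- ===== PORT B =====
-- B's outer while loop: at a parenthesis emit it; otherwise the inner scan finds the end of the
-- maximal non-parenthesis run (takeWhile/dropWhile = the j-scan and the slice str[i:j]).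
def isParenB (c : Char) : Bool := c = '(' ∨ c = ')'

def subtokGoB : List Char → List String
  | [] => []
  | c :: cs =>
    if isParenB c then String.mk [c] :: subtokGoB cs
    else String.mk (c :: cs.takeWhile (fun x => !isParenB x)) :: subtokGoB (cs.dropWhile (fun x => !isParenB x))
termination_by cs => cs.length
decreasing_by simp; exact Nat.lt_succ_of_le (List.length_dropWhile_le _ _)

def subtokenize_alt (str : String) : List String := subtokGoB str.toList

-- ===== PRECONDITION & SPEC =====
def Spec_subtokenize (str : String) (out : List String) : Prop := out = subtokenize_alt str
instance (str : String) (out : List String) : Decidable (Spec_subtokenize str out) := by unfold Spec_subtokenize; infer_instance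

-- ===== CLAIM (what is proved, stated in full; the proofs are below) =====
def Claim_equal_subtokenize : Prop := ∀ (str : String), Dom_subtokenize str → Spec_subtokenize str (subtokenize str)

-- ===== LEMMAS AND PROOFS =====
def subtokFlush (acc : List Char) : List String :=
  if acc.length > 0 then [String.mk acc] else []

theorem subtokGoB_nil : subtokGoB [] = [] := by rw [subtokGoB]

theorem subtokGoB_paren (c : Char) (cs : List Char) (h : isParenB c = true) :
    subtokGoB (c :: cs) = String.mk [c] :: subtokGoB cs := by
  rw [subtokGoB]; simp [h]

-- B unrolled one maximal run at a time
theorem subtokGoB_run (cs : List Char) :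
    subtokGoB cs = subtokFlush (cs.takeWhile (fun x => !isParenB x))
      ++ subtokGoB (cs.dropWhile (fun x => !isParenB x)) := by
  cases cs with
  | nil => simp [subtokGoB_nil, subtokFlush]
  | cons c cs =>
    by_cases h : isParenB c
    · simp [subtokGoB_paren c cs h, h, subtokFlush]
    · rw [subtokGoB]; simp [h, subtokFlush]

-- the result list accumulator factors out of A's fold
theorem subtok_prefix (cs : List Char) : ∀ (res : List String) (acc : List Char),
    List.foldl subtokStepA (res, acc) cs
      = (res ++ (List.foldl subtokStepA ([], acc) cs).1,
         (List.foldl subtokStepA ([], acc) cs).2) := by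
  induction cs with
  | nil => intro res acc; simp
  | cons c cs ih =>
    intro res acc
    by_cases h : c = '(' ∨ c = ')'
    · simp only [List.foldl_cons, subtokStepA, if_pos h]
      rw [ih (res ++ (if acc.length > 0 then [String.mk acc] else []) ++ [String.mk [c]]) [],
          ih (([] : List String) ++ (if acc.length > 0 then [String.mk acc] else []) ++ [String.mk [c]]) []]
      simp
    · simp only [List.foldl_cons, subtokStepA, if_neg h]
      exact ih res (acc ++ [c])

-- the merge function relating A's pending buffer to B's maximal-run structure
theorem subtok_mix (cs : List Char) : ∀ acc : List Char,
    (List.foldl subtokStepA (([] : List String), acc) cs).1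
      ++ subtokFlush (List.foldl subtokStepA (([] : List String), acc) cs).2
    = subtokFlush (acc ++ cs.takeWhile (fun x => !isParenB x))
      ++ subtokGoB (cs.dropWhile (fun x => !isParenB x)) := by
  induction cs with
  | nil => intro acc; simp [subtokGoB_nil, subtokFlush]
  | cons c cs ih =>
    intro acc
    rw [List.foldl_cons]
    by_cases h : isParenB c
    · have hp : c = '(' ∨ c = ')' := by simpa [isParenB] using h
      rw [show subtokStepA ([], acc) c = (subtokFlush acc ++ [String.mk [c]], []) from by
        simp [subtokStepA, hp, subtokFlush]]
      rw [subtok_prefix cs (subtokFlush acc ++ [String.mk [c]]) []]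
      rw [List.append_assoc, ih []]
      simp [h, subtokGoB_paren c cs h, subtokGoB_run cs]
    · have hnp : ¬ (c = '(' ∨ c = ')') := by simpa [isParenB] using h
      rw [show subtokStepA ([], acc) c = ([], acc ++ [c]) from by simp [subtokStepA, hnp]]
      rw [ih (acc ++ [c])]
      simp [h]

-- ===== VERDICT (by name: the statement is the Claim_ definition above) =====
theorem subtokenize_spec : Claim_equal_subtokenize := by
  intro str _
  unfold Spec_subtokenize subtokenize subtokenize_alt
  show (List.foldl subtokStepA ([], []) str.toList).1
      ++ subtokFlush (List.foldl subtokStepA ([], []) str.toList).2 = subtokGoB str.toList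
  rw [subtok_mix str.toList []]
  simp only [List.nil_append]
  exact (subtokGoB_run str.toList).symm
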